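-- pv_equiv track=rewrite | github.com/stalker-fc/ifmo2k19 | labs/golay.py | _make_3bit_errors
-- ===== SOURCE A (Python) =====
-- def _make_3bit_errors(veclen=24):
--     """ return list of all bitvectors with <= 3 bits as 1's, rest 0's
--     returns list of lists, each 24 bits long by default.
--     not included:
--     [0, 0, 0, 1, 0, 1, 1, 0, 1, 1, 1, 1, 0, 0, 0, 1, 0, 1, 1, 0, 0, 0, 1, 0]
--     included:
--     [0, 0, 0, 1, 0, 0, 0, 0, 0, 0, 0, 0, 0, 0, 0, 1, 0, 0, 0, 0, 0, 0, 0, 0],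
--     """
--     errorvecs = []
--     # all zeros
--     errorvecs.append([0] * veclen)
--     # one 1
--     for i in range(veclen):
--         vec = [0] * veclen
--         vec[i] = 1
--         errorvecs.append(vec)
--
--     # two 1s
--     for i in range(veclen):
--         for j in range(i + 1, veclen):
--             vec = [0] * veclen
--             vec[i] = 1
--             vec[j] = 1
--             errorvecs.append(vec)
--
--     # three 1s
--     for i in range(veclen):
--         for j in range(i + 1, veclen):
--             for k in range(j + 1, veclen):
--                 vec = [0] * veclen
--                 vec[i] = 1
--                 vec[j] = 1
--                 vec[k] = 1
--                 errorvecs.append(vec)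
--     return errorvecs
-- ===== SOURCE B (Python) =====
-- def _combinations(items, r):
--     """All r-element combinations of items, in itertools.combinations order."""
--     if r == 0:
--         return [[]]
--     out = []
--     for idx in range(len(items)):
--         for rest in _combinations(items[idx + 1:], r - 1):
--             out.append([items[idx]] + rest)
--     return out
--
--
-- def _make_3bit_errors(veclen=24):
--     errorvecs = []
--     for r in range(4):
--         for positions in _combinations(list(range(veclen)), r):
--             vec = [0] * veclen
--             for p in positions:
--                 vec[p] = 1
--             errorvecs.append(vec)
--     return errorvecs
-- ===== Notes on version B (the rewrite author's own statement) =====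
-- stated objective: simpler
-- what changed: A's four separate, increasingly nested loop blocks (one block per possible number of set bits) are replaced by a single loop over the bit count driven by a general recursive combinations helper that yields the positions of the set bits in the same lexicographic order.
import Mathlib
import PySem

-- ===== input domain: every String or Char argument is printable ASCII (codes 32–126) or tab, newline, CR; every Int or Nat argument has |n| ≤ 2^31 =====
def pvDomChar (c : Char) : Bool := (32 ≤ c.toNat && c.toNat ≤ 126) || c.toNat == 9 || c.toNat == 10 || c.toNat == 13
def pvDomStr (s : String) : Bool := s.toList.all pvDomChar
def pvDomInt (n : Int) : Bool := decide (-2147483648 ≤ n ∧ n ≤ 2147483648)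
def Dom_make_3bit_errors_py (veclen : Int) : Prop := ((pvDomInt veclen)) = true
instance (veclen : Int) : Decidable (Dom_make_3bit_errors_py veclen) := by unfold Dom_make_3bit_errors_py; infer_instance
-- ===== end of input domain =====

-- B replaces A's four hard-coded, increasingly nested loop blocks by one pass over the
-- number r of set bits using a general recursive combinations helper (objective: simpler).

-- ===== PORT A =====
def make_3bit_errors_py (veclen : Int) : List (List Int) :=
  let errorvecs : List (List Int) := []
  -- all zeros
  let errorvecs := errorvecs ++ [PySem.List.pyRepeat [0] veclen]
  -- one 1
  let errorvecs := (PySem.List.pyRange 0 veclen 1).foldl (fun acc i =>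
      acc ++ [PySem.List.pySetD (PySem.List.pyRepeat [0] veclen) i 1]) errorvecs
  -- two 1s
  let errorvecs := (PySem.List.pyRange 0 veclen 1).foldl (fun acc i =>
      (PySem.List.pyRange (i+1) veclen 1).foldl (fun acc2 j =>
        acc2 ++ [PySem.List.pySetD (PySem.List.pySetD (PySem.List.pyRepeat [0] veclen) i 1) j 1]) acc) errorvecs
  -- three 1s
  let errorvecs := (PySem.List.pyRange 0 veclen 1).foldl (fun acc i =>
      (PySem.List.pyRange (i+1) veclen 1).foldl (fun acc2 j =>
        (PySem.List.pyRange (j+1) veclen 1).foldl (fun acc3 k =>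
          acc3 ++ [PySem.List.pySetD (PySem.List.pySetD (PySem.List.pySetD (PySem.List.pyRepeat [0] veclen) i 1) j 1) k 1]) acc2) acc) errorvecs
  errorvecs

-- ===== PORT B =====
-- port of Source B's _combinations (recursion on the item list = the idx/slice loop of the Python)
def pvComb : List Int → Nat → List (List Int)
  | _, 0 => [[]]
  | [], _+1 => []
  | x :: xs, r+1 => ((pvComb xs r).map (fun p => x :: p)) ++ pvComb xs (r+1)

-- vec = [0]*veclen; for p in positions: vec[p] = 1
def pvVecOf (veclen : Int) (positions : List Int) : List Int :=
  positions.foldl (fun vec p => PySem.List.pySetD vec p 1) (PySem.List.pyRepeat [0] veclen)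

def make_3bit_errors_py_alt (veclen : Int) : List (List Int) :=
  (List.range 4).flatMap (fun r =>
    (pvComb (PySem.List.pyRange 0 veclen 1) r).map (pvVecOf veclen))

-- ===== PRECONDITION & SPEC =====
def Spec_make_3bit_errors_py (veclen : Int) (out : List (List Int)) : Prop := out = make_3bit_errors_py_alt veclen
instance (veclen : Int) (out : List (List Int)) : Decidable (Spec_make_3bit_errors_py veclen out) := by unfold Spec_make_3bit_errors_py; infer_instance

-- ===== CLAIM (what is proved, stated in full; the proofs are below) =====
def Claim_equal_make_3bit_errors_py : Prop := ∀ (veclen : Int), Dom_make_3bit_errors_py veclen → Spec_make_3bit_errors_py veclen (make_3bit_errors_py veclen)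

-- ===== LEMMAS AND PROOFS =====

-- building a vector from positions x :: p = building from p on the vector with bit x already set
def pvVecFrom (v : List Int) (p : List Int) : List Int :=
  p.foldl (fun vec q => PySem.List.pySetD vec q 1) v

theorem pvVecFrom_cons (v : List Int) (x : Int) :
    (pvVecFrom v ∘ fun p => x :: p) = pvVecFrom (PySem.List.pySetD v x 1) :=
  funext (fun _ => rfl)

theorem pvVecOf_eq (n : Int) : pvVecOf n = pvVecFrom (PySem.List.pyRepeat [0] n) :=
  funext (fun _ => rfl)

-- depth-1 loop of A = combinations of size 1
theorem pvL1 (n : Int) : ∀ (m : Nat) (a : Int), n - a = (m : Int) →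
    ∀ (v : List Int) (acc : List (List Int)),
    (PySem.List.pyRange a n 1).foldl (fun acc i => acc ++ [PySem.List.pySetD v i 1]) acc
      = acc ++ (pvComb (PySem.List.pyRange a n 1) 1).map (pvVecFrom v) := by
  intro m
  induction m with
  | zero =>
    intro a ha v acc
    rw [PySem.List.pyRange_one_eq_nil (by omega)]
    simp [pvComb]
  | succ m ih =>
    intro a ha v acc
    rw [PySem.List.pyRange_one_cons (by omega)]
    simp only [List.foldl_cons, pvComb, List.map_append, List.map_cons, List.map_nil]
    rw [ih (a+1) (by omega)]
    simp [pvVecFrom]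

-- depth-2 nested loops of A = combinations of size 2
theorem pvL2 (n : Int) : ∀ (m : Nat) (a : Int), n - a = (m : Int) →
    ∀ (v : List Int) (acc : List (List Int)),
    (PySem.List.pyRange a n 1).foldl (fun acc i =>
        (PySem.List.pyRange (i+1) n 1).foldl (fun acc2 j =>
          acc2 ++ [PySem.List.pySetD (PySem.List.pySetD v i 1) j 1]) acc) acc
      = acc ++ (pvComb (PySem.List.pyRange a n 1) 2).map (pvVecFrom v) := by
  intro m
  induction m with
  | zero =>
    intro a ha v acc
    rw [PySem.List.pyRange_one_eq_nil (by omega)]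
    simp [pvComb]
  | succ m ih =>
    intro a ha v acc
    rw [PySem.List.pyRange_one_cons (by omega)]
    simp only [List.foldl_cons]
    rw [pvL1 n m (a+1) (by omega) (PySem.List.pySetD v a 1) acc,
        ih (a+1) (by omega)]
    simp only [pvComb, List.map_append, List.map_map, List.append_assoc, pvVecFrom_cons]

-- depth-3 nested loops of A = combinations of size 3
theorem pvL3 (n : Int) : ∀ (m : Nat) (a : Int), n - a = (m : Int) →
    ∀ (v : List Int) (acc : List (List Int)),
    (PySem.List.pyRange a n 1).foldl (fun acc i =>
        (PySem.List.pyRange (i+1) n 1).foldl (fun acc2 j =>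
          (PySem.List.pyRange (j+1) n 1).foldl (fun acc3 k =>
            acc3 ++ [PySem.List.pySetD (PySem.List.pySetD (PySem.List.pySetD v i 1) j 1) k 1]) acc2) acc) acc
      = acc ++ (pvComb (PySem.List.pyRange a n 1) 3).map (pvVecFrom v) := by
  intro m
  induction m with
  | zero =>
    intro a ha v acc
    rw [PySem.List.pyRange_one_eq_nil (by omega)]
    simp [pvComb]
  | succ m ih =>
    intro a ha v acc
    rw [PySem.List.pyRange_one_cons (by omega)]
    simp only [List.foldl_cons]
    rw [pvL2 n m (a+1) (by omega) (PySem.List.pySetD v a 1) acc,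
        ih (a+1) (by omega)]
    simp only [pvComb, List.map_append, List.map_map, List.append_assoc, pvVecFrom_cons]

-- ===== VERDICT (by name: the statement is the Claim_ definition above) =====
theorem make_3bit_errors_py_spec : Claim_equal_make_3bit_errors_py := by
  intro n _
  show make_3bit_errors_py n = make_3bit_errors_py_alt n
  unfold make_3bit_errors_py make_3bit_errors_py_alt
  dsimp only
  rcases le_or_gt n 0 with hn | hn
  · rw [PySem.List.pyRange_one_eq_nil (by omega)]
    simp [pvComb, pvVecOf, List.range_succ]
  · have hm : n - 0 = ((n.toNat : Nat) : Int) := by omega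
    rw [pvL1 n n.toNat 0 hm (PySem.List.pyRepeat [0] n),
        pvL2 n n.toNat 0 hm (PySem.List.pyRepeat [0] n),
        pvL3 n n.toNat 0 hm (PySem.List.pyRepeat [0] n)]
    simp [List.range_succ, pvVecOf_eq, pvComb, pvVecFrom]
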